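-- pv_equiv track=rewrite | github.com/jakedibattista/modelforpuckbuddy | agents/openice_agent.py | _analyze_shooting_strengths_weaknesses
-- ===== SOURCE A (Python) =====
-- from typing import Dict, Any, List, Optional, Tuple
--
-- def _analyze_shooting_strengths_weaknesses(analysis_data: str) -> Dict[str, List[str]]:
--     """Extract strengths and weaknesses from analysis data."""
--     strengths = []
--     weaknesses = []
--
--     # Parse analysis data to identify key metrics
--     analysis_lower = analysis_data.lower()
--
--     # Check for good scores/categories (strengths)
--     if any(term in analysis_lower for term in ["excellent", "very good", "good"]):
--         if "hip rotation" in analysis_lower and any(x in analysis_lower for x in ["excellent", "good"]):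
--             strengths.append("hip_rotation")
--         if "wrist extension" in analysis_lower and any(x in analysis_lower for x in ["excellent", "good"]):
--             strengths.append("wrist_extension")
--         if "head position" in analysis_lower and any(x in analysis_lower for x in ["excellent", "good"]):
--             strengths.append("head_position")
--         if "body stability" in analysis_lower and any(x in analysis_lower for x in ["excellent", "good"]):
--             strengths.append("body_stability")
--         if "weight transfer" in analysis_lower and any(x in analysis_lower for x in ["excellent", "good"]):
--             strengths.append("weight_transfer")
--         if "knee bend" in analysis_lower and ("excellent" in analysis_lower or "good bend" in analysis_lower):
--             strengths.append("knee_bend")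
--
--     # Check for poor scores/categories (weaknesses)
--     if any(term in analysis_lower for term in ["needs work", "poor", "fair", "minimal"]):
--         if "hip rotation" in analysis_lower and any(x in analysis_lower for x in ["needs work", "poor", "fair"]):
--             weaknesses.append("hip_rotation")
--         if "wrist" in analysis_lower and any(x in analysis_lower for x in ["needs work", "poor", "fair"]):
--             weaknesses.append("wrist_extension")
--         if "head" in analysis_lower and any(x in analysis_lower for x in ["needs work", "poor", "dropped"]):
--             weaknesses.append("head_position")
--         if "stability" in analysis_lower and any(x in analysis_lower for x in ["poor", "needs work"]):
--             weaknesses.append("body_stability")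
--         if "weight transfer" in analysis_lower and any(x in analysis_lower for x in ["poor", "needs work"]):
--             weaknesses.append("weight_transfer")
--         if "knee" in analysis_lower and any(x in analysis_lower for x in ["too straight", "shallow", "needs work"]):
--             weaknesses.append("knee_bend")
--         if "follow through" in analysis_lower and any(x in analysis_lower for x in ["rushed", "poor"]):
--             weaknesses.append("follow_through")
--
--     return {"strengths": strengths, "weaknesses": weaknesses}
-- ===== SOURCE B (Python) =====
-- TERMS = [
--     "excellent", "very good", "good", "needs work", "poor", "fair", "minimal",
--     "hip rotation", "wrist extension", "head position", "body stability",
--     "weight transfer", "knee bend", "good bend", "wrist", "head", "stability",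
--     "knee", "too straight", "shallow", "dropped", "follow through", "rushed",
-- ]
--
-- STRENGTH_RULES = [
--     ("hip rotation", ["excellent", "good"], "hip_rotation"),
--     ("wrist extension", ["excellent", "good"], "wrist_extension"),
--     ("head position", ["excellent", "good"], "head_position"),
--     ("body stability", ["excellent", "good"], "body_stability"),
--     ("weight transfer", ["excellent", "good"], "weight_transfer"),
--     ("knee bend", ["excellent", "good bend"], "knee_bend"),
-- ]
--
-- WEAKNESS_RULES = [
--     ("hip rotation", ["needs work", "poor", "fair"], "hip_rotation"),
--     ("wrist", ["needs work", "poor", "fair"], "wrist_extension"),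
--     ("head", ["needs work", "poor", "dropped"], "head_position"),
--     ("stability", ["poor", "needs work"], "body_stability"),
--     ("weight transfer", ["poor", "needs work"], "weight_transfer"),
--     ("knee", ["too straight", "shallow", "needs work"], "knee_bend"),
--     ("follow through", ["rushed", "poor"], "follow_through"),
-- ]
--
--
-- def _analyze_shooting_strengths_weaknesses(analysis_data: str):
--     """Single scan over the text collects every matched keyword into a set;
--     all rule checks are then set-membership lookups (no further text scans)."""
--     low = analysis_data.lower()
--     found = set()
--     for i in range(len(low)):
--         for t in TERMS:
--             if low.startswith(t, i):
--                 found.add(t)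
--     has_good = "excellent" in found or "very good" in found or "good" in found
--     has_bad = ("needs work" in found or "poor" in found or "fair" in found
--                or "minimal" in found)
--     strengths = [lab for key, terms, lab in STRENGTH_RULES
--                  if has_good and key in found and any(t in found for t in terms)]
--     weaknesses = [lab for key, terms, lab in WEAKNESS_RULES
--                   if has_bad and key in found and any(t in found for t in terms)]
--     return {"strengths": strengths, "weaknesses": weaknesses}
-- ===== Notes on version B (the rewrite author's own statement) =====
-- stated objective: alternative
-- what changed: B makes a single left-to-right scan of the lowered text that collects every matched keyword into a found-set (multi-pattern matching at each position), then evaluates the gates and rule tables purely by set-membership lookups, instead of A's flat if-statements each doing its own substring search per keyword.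
import Mathlib
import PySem

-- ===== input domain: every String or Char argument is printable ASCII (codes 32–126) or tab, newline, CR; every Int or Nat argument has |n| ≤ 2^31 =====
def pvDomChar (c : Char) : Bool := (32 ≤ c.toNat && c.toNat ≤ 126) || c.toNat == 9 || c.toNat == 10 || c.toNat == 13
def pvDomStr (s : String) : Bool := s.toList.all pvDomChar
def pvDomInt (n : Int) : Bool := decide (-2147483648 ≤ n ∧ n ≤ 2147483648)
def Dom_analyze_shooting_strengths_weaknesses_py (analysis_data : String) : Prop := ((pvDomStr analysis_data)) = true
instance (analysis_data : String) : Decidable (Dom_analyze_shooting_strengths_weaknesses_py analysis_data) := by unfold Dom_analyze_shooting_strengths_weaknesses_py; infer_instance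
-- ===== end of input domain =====

-- B replaces A's repeated per-keyword substring searches by ONE left-to-right scan of the text
-- that collects every matched keyword into a set; all rule checks are then set-membership
-- lookups. Objective: alternative algorithm (no speed claim).

-- ===== PORT A =====
def analyze_shooting_strengths_weaknesses_py (analysis_data : String) : List (String × List String) :=
  let analysis_lower := PySem.Str.lower analysis_data
  let strengths : List String := []
  let weaknesses : List String := []
  let strengths :=
    if ["excellent", "very good", "good"].any (fun term => PySem.Str.isIn term analysis_lower) then
      let strengths := if PySem.Str.isIn "hip rotation" analysis_lower && ["excellent", "good"].any (fun x => PySem.Str.isIn x analysis_lower) then strengths ++ ["hip_rotation"] else strengths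
      let strengths := if PySem.Str.isIn "wrist extension" analysis_lower && ["excellent", "good"].any (fun x => PySem.Str.isIn x analysis_lower) then strengths ++ ["wrist_extension"] else strengths
      let strengths := if PySem.Str.isIn "head position" analysis_lower && ["excellent", "good"].any (fun x => PySem.Str.isIn x analysis_lower) then strengths ++ ["head_position"] else strengths
      let strengths := if PySem.Str.isIn "body stability" analysis_lower && ["excellent", "good"].any (fun x => PySem.Str.isIn x analysis_lower) then strengths ++ ["body_stability"] else strengths
      let strengths := if PySem.Str.isIn "weight transfer" analysis_lower && ["excellent", "good"].any (fun x => PySem.Str.isIn x analysis_lower) then strengths ++ ["weight_transfer"] else strengths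
      let strengths := if PySem.Str.isIn "knee bend" analysis_lower && (PySem.Str.isIn "excellent" analysis_lower || PySem.Str.isIn "good bend" analysis_lower) then strengths ++ ["knee_bend"] else strengths
      strengths
    else strengths
  let weaknesses :=
    if ["needs work", "poor", "fair", "minimal"].any (fun term => PySem.Str.isIn term analysis_lower) then
      let weaknesses := if PySem.Str.isIn "hip rotation" analysis_lower && ["needs work", "poor", "fair"].any (fun x => PySem.Str.isIn x analysis_lower) then weaknesses ++ ["hip_rotation"] else weaknesses
      let weaknesses := if PySem.Str.isIn "wrist" analysis_lower && ["needs work", "poor", "fair"].any (fun x => PySem.Str.isIn x analysis_lower) then weaknesses ++ ["wrist_extension"] else weaknesses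
      let weaknesses := if PySem.Str.isIn "head" analysis_lower && ["needs work", "poor", "dropped"].any (fun x => PySem.Str.isIn x analysis_lower) then weaknesses ++ ["head_position"] else weaknesses
      let weaknesses := if PySem.Str.isIn "stability" analysis_lower && ["poor", "needs work"].any (fun x => PySem.Str.isIn x analysis_lower) then weaknesses ++ ["body_stability"] else weaknesses
      let weaknesses := if PySem.Str.isIn "weight transfer" analysis_lower && ["poor", "needs work"].any (fun x => PySem.Str.isIn x analysis_lower) then weaknesses ++ ["weight_transfer"] else weaknesses
      let weaknesses := if PySem.Str.isIn "knee" analysis_lower && ["too straight", "shallow", "needs work"].any (fun x => PySem.Str.isIn x analysis_lower) then weaknesses ++ ["knee_bend"] else weaknesses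
      let weaknesses := if PySem.Str.isIn "follow through" analysis_lower && ["rushed", "poor"].any (fun x => PySem.Str.isIn x analysis_lower) then weaknesses ++ ["follow_through"] else weaknesses
      weaknesses
    else weaknesses
  [("strengths", strengths), ("weaknesses", weaknesses)]

-- ===== PORT B =====
-- every keyword the rules ever test for
def pvTerms : List String :=
  ["excellent", "very good", "good", "needs work", "poor", "fair", "minimal",
   "hip rotation", "wrist extension", "head position", "body stability",
   "weight transfer", "knee bend", "good bend", "wrist", "head", "stability",
   "knee", "too straight", "shallow", "dropped", "follow through", "rushed"]

def pvStrengthRules : List (String × List String × String) :=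
  [("hip rotation", (["excellent", "good"], "hip_rotation")),
   ("wrist extension", (["excellent", "good"], "wrist_extension")),
   ("head position", (["excellent", "good"], "head_position")),
   ("body stability", (["excellent", "good"], "body_stability")),
   ("weight transfer", (["excellent", "good"], "weight_transfer")),
   ("knee bend", (["excellent", "good bend"], "knee_bend"))]

def pvWeaknessRules : List (String × List String × String) :=
  [("hip rotation", (["needs work", "poor", "fair"], "hip_rotation")),
   ("wrist", (["needs work", "poor", "fair"], "wrist_extension")),
   ("head", (["needs work", "poor", "dropped"], "head_position")),
   ("stability", (["poor", "needs work"], "body_stability")),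
   ("weight transfer", (["poor", "needs work"], "weight_transfer")),
   ("knee", (["too straight", "shallow", "needs work"], "knee_bend")),
   ("follow through", (["rushed", "poor"], "follow_through"))]

-- the single scan: for i in range(len(low)): for t in TERMS: if low.startswith(t, i): found.add(t)
-- (low.startswith(t, i) with 0 <= i is exactly t.toList.isPrefixOf (low.drop i.toNat))
def pvFound (low : List Char) : PySem.Set String :=
  (PySem.List.pyRange 0 low.length 1).foldl
    (fun acc i => pvTerms.foldl
      (fun a t => if t.toList.isPrefixOf (low.drop i.toNat) then PySem.Set.add a t else a) acc)
    PySem.Set.empty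

-- the rule-table comprehension, testing membership in the found-set only
def pvPick (gate : Bool) (found : PySem.Set String) (rules : List (String × List String × String)) : List String :=
  rules.filterMap (fun r =>
    if gate && (PySem.Set.contains found r.1 && r.2.1.any (fun t => PySem.Set.contains found t)) then some r.2.2 else none)

def analyze_shooting_strengths_weaknesses_py_alt (analysis_data : String) : List (String × List String) :=
  let low := PySem.Str.lower analysis_data
  let found := pvFound low.toList
  let has_good := PySem.Set.contains found "excellent" || PySem.Set.contains found "very good" || PySem.Set.contains found "good"
  let has_bad := PySem.Set.contains found "needs work" || PySem.Set.contains found "poor" || PySem.Set.contains found "fair" || PySem.Set.contains found "minimal"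
  [("strengths", pvPick has_good found pvStrengthRules),
   ("weaknesses", pvPick has_bad found pvWeaknessRules)]

-- ===== PRECONDITION & SPEC =====
def Spec_analyze_shooting_strengths_weaknesses_py (analysis_data : String) (out : List (String × List String)) : Prop := out = analyze_shooting_strengths_weaknesses_py_alt analysis_data
instance (analysis_data : String) (out : List (String × List String)) : Decidable (Spec_analyze_shooting_strengths_weaknesses_py analysis_data out) := by unfold Spec_analyze_shooting_strengths_weaknesses_py; infer_instance

-- ===== CLAIM =====
def Claim_equal_analyze_shooting_strengths_weaknesses_py : Prop := ∀ (analysis_data : String), Dom_analyze_shooting_strengths_weaknesses_py analysis_data → Spec_analyze_shooting_strengths_weaknesses_py analysis_data (analyze_shooting_strengths_weaknesses_py analysis_data)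

-- ===== LEMMAS AND PROOFS =====

-- membership in the inner fold (one text position, all terms)
theorem pv_mem_foldl_addif (p : String → Bool) (l : List String) (acc : PySem.Set String) (x : String) :
    x ∈ l.foldl (fun a t => if p t then PySem.Set.add a t else a) acc ↔
      x ∈ acc ∨ (x ∈ l ∧ p x = true) := by
  induction l generalizing acc with
  | nil => simp
  | cons h tl ih =>
    simp only [List.foldl_cons, ih, List.mem_cons]
    by_cases hp : p h = true <;> simp [hp, PySem.Set.mem_add] <;> constructor <;> rintro (h1 | h1) <;> try tauto
    · rcases h1 with h1 | h1
      · tauto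
      · subst h1; tauto
    · rcases h1 with ⟨h1 | h1, h2⟩
      · subst h1; tauto
      · tauto

-- membership in the whole scan (outer fold over the positions)
theorem pv_mem_outer (low : List Char) (l : List Int) (acc : PySem.Set String) (x : String) :
    x ∈ l.foldl (fun acc i => pvTerms.foldl
        (fun a t => if t.toList.isPrefixOf (low.drop i.toNat) then PySem.Set.add a t else a) acc) acc ↔
      x ∈ acc ∨ (x ∈ pvTerms ∧ ∃ i ∈ l, x.toList.isPrefixOf (low.drop i.toNat)) := by
  induction l generalizing acc with
  | nil => simp
  | cons h tl ih =>
    simp only [List.foldl_cons, ih, pv_mem_foldl_addif, List.mem_cons]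
    constructor
    · rintro ((h1 | ⟨h1, h2⟩) | ⟨h1, i, hi, hp⟩)
      · tauto
      · exact Or.inr ⟨h1, h, Or.inl rfl, h2⟩
      · exact Or.inr ⟨h1, i, Or.inr hi, hp⟩
    · rintro (h1 | ⟨h1, i, hi | hi, hp⟩)
      · tauto
      · subst hi; tauto
      · exact Or.inr ⟨h1, i, hi, hp⟩

theorem pv_mem_pvFound (low : List Char) (x : String) :
    x ∈ pvFound low ↔
      x ∈ pvTerms ∧ ∃ i ∈ PySem.List.pyRange 0 low.length 1, x.toList.isPrefixOf (low.drop i.toNat) := by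
  unfold pvFound
  rw [pv_mem_outer]
  simp [PySem.Set.empty]

-- the scan finds exactly the keywords occurring in the text
theorem pv_contains_pvFound (s : String) (x : String) (hx : x ∈ pvTerms) (hne : x.toList ≠ []) :
    PySem.Set.contains (pvFound s.toList) x = PySem.Str.isIn x s := by
  rw [Bool.eq_iff_iff, PySem.Set.contains_iff, pv_mem_pvFound, PySem.Str.isIn_iff_infix,
    ← PySem.Chars.isIn_iff_infix, ← PySem.Chars.exists_prefix_drop_iff_isIn]
  constructor
  · rintro ⟨-, i, _, hp⟩
    exact ⟨i.toNat, List.isPrefixOf_iff_prefix.mp hp⟩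
  · rintro ⟨j, hj⟩
    refine ⟨hx, ?_⟩
    by_cases hlt : j < s.toList.length
    · refine ⟨(j : Int), ?_, ?_⟩
      · rw [PySem.List.mem_pyRange_one]
        constructor
        · exact_mod_cast Nat.zero_le j
        · exact_mod_cast hlt
      · rw [Int.toNat_natCast]
        exact List.isPrefixOf_iff_prefix.mpr hj
    · exfalso
      rw [List.drop_eq_nil_of_le (by omega)] at hj
      exact hne (List.prefix_nil.mp hj)

-- one chain step of A: appending under an if, pulled out as an optional singleton
theorem pv_if_append {c : Prop} [Decidable c] (s : List String) (x : String) :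
    (if c then s ++ [x] else s) = s ++ (if c then [x] else []) := by split_ifs <;> simp

-- the comprehension as a right fold of optional singletons
theorem pvPick_eq_foldr (g : Bool) (found : PySem.Set String) (rules : List (String × List String × String)) :
    pvPick g found rules
      = rules.foldr (fun r acc =>
          (if g && (PySem.Set.contains found r.1 && r.2.1.any (fun t => PySem.Set.contains found t)) then [r.2.2] else []) ++ acc) [] := by
  unfold pvPick
  induction rules with
  | nil => rfl
  | cons a l ih =>
    rw [List.filterMap_cons, List.foldr_cons, ← ih]
    cases h : (g && (PySem.Set.contains found a.1 && a.2.1.any (fun t => PySem.Set.contains found t))) <;> rfl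

-- ===== VERDICT =====
theorem analyze_shooting_strengths_weaknesses_py_spec : Claim_equal_analyze_shooting_strengths_weaknesses_py := by
  intro s _
  show _ = _
  have hc : ∀ x ∈ pvTerms, PySem.Set.contains (pvFound (PySem.Str.lower s).toList) x = PySem.Str.isIn x (PySem.Str.lower s) := by
    intro x hx
    refine pv_contains_pvFound _ x hx ?_
    revert hx; unfold pvTerms; intro hx
    fin_cases hx <;> decide
  simp only [analyze_shooting_strengths_weaknesses_py, analyze_shooting_strengths_weaknesses_py_alt,
    pvPick_eq_foldr, pvStrengthRules, pvWeaknessRules, List.foldr_cons, List.foldr_nil]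
  simp only [hc _ (by decide : ("excellent" : String) ∈ pvTerms), hc _ (by decide : ("very good" : String) ∈ pvTerms),
    hc _ (by decide : ("good" : String) ∈ pvTerms), hc _ (by decide : ("needs work" : String) ∈ pvTerms),
    hc _ (by decide : ("poor" : String) ∈ pvTerms), hc _ (by decide : ("fair" : String) ∈ pvTerms),
    hc _ (by decide : ("minimal" : String) ∈ pvTerms), hc _ (by decide : ("hip rotation" : String) ∈ pvTerms),
    hc _ (by decide : ("wrist extension" : String) ∈ pvTerms), hc _ (by decide : ("head position" : String) ∈ pvTerms),
    hc _ (by decide : ("body stability" : String) ∈ pvTerms), hc _ (by decide : ("weight transfer" : String) ∈ pvTerms),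
    hc _ (by decide : ("knee bend" : String) ∈ pvTerms), hc _ (by decide : ("good bend" : String) ∈ pvTerms),
    hc _ (by decide : ("wrist" : String) ∈ pvTerms), hc _ (by decide : ("head" : String) ∈ pvTerms),
    hc _ (by decide : ("stability" : String) ∈ pvTerms), hc _ (by decide : ("knee" : String) ∈ pvTerms),
    hc _ (by decide : ("too straight" : String) ∈ pvTerms), hc _ (by decide : ("shallow" : String) ∈ pvTerms),
    hc _ (by decide : ("dropped" : String) ∈ pvTerms), hc _ (by decide : ("follow through" : String) ∈ pvTerms),
    hc _ (by decide : ("rushed" : String) ∈ pvTerms),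
    List.any_cons, List.any_nil, Bool.or_false]
  simp only [pv_if_append]
  rcases Bool.dichotomy (PySem.Str.isIn "excellent" (PySem.Str.lower s) || PySem.Str.isIn "very good" (PySem.Str.lower s) || PySem.Str.isIn "good" (PySem.Str.lower s)) with hg | hg <;>
  rcases Bool.dichotomy (PySem.Str.isIn "needs work" (PySem.Str.lower s) || PySem.Str.isIn "poor" (PySem.Str.lower s) || PySem.Str.isIn "fair" (PySem.Str.lower s) || PySem.Str.isIn "minimal" (PySem.Str.lower s)) with hb | hb <;>
    simp only [← Bool.or_assoc] at * <;>
    rw [hg, hb] <;>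
    simp only [Bool.true_and, Bool.false_and, Bool.false_eq_true, if_false, if_true,
      List.append_assoc, List.nil_append, List.append_nil]
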